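-- pv_equiv track=rewrite | github.com/sumaiyaazad/dsitributed_simulation_based_search | benchmark_matchmaking.py | form_matches_fifo
-- ===== SOURCE A (Python) =====
-- from typing import Optional
--
-- def form_matches_fifo(
--     workload_seed_indices,
--     num_players: int,
--     players_per_match: int = 10,
--     max_matches: Optional[int] = None,
-- ):
--     """
--     FIFO baseline:
--     - We maintain a queue of "waiting" players.
--     - When there are >= players_per_match distinct non-busy players in the queue,
--       we pop the first players_per_match and form a match.
--     - A player can only appear in one match (busy set).
--     """
--     from collections import deque
--
--     busy = set()
--     queue = deque()
--     matches = []
--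
--     for seed_idx in workload_seed_indices:
--         if seed_idx < 0 or seed_idx >= num_players:
--             continue
--
--         if seed_idx in busy:
--             # Already matched, ignore this arrival
--             continue
--
--         # Add to queue
--         queue.append(seed_idx)
--
--         # Try to form a match while possible
--         while len(queue) > 0:
--             # Count distinct non-busy players in queue
--             distinct = []
--             seen = set()
--             for idx in list(queue):
--                 if idx not in busy and idx not in seen:
--                     distinct.append(idx)
--                     seen.add(idx)
--                 if len(distinct) >= players_per_match:
--                     break
--
--             if len(distinct) < players_per_match:
--                 # Not enough distinct players yet
--                 break
--
--             chosen = distinct[:players_per_match]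
--             matches.append(chosen)
--
--             # Remove chosen from queue and mark busy
--             new_queue = deque()
--             chosen_set = set(chosen)
--             while queue:
--                 x = queue.popleft()
--                 if x not in chosen_set:
--                     new_queue.append(x)
--             queue = new_queue
--
--             for pid in chosen:
--                 busy.add(pid)
--
--             if max_matches is not None and len(matches) >= max_matches:
--                 return matches
--
--     return matches
-- ===== SOURCE B (Python) =====
-- from typing import Optional
--
-- def form_matches_fifo(
--     workload_seed_indices,
--     num_players: int,
--     players_per_match: int = 10,
--     max_matches: Optional[int] = None,
-- ):
--     # One pass: keep the distinct non-busy waiting players (arrival order);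
--     # as soon as the threshold is reached they form the next match.
--     matches = []
--     busy = set()
--     waiting = []        # distinct waiting players, in first-arrival order
--     waiting_set = set()
--     for s in workload_seed_indices:
--         if 0 <= s < num_players and s not in busy and s not in waiting_set:
--             waiting.append(s)
--             waiting_set.add(s)
--             if len(waiting) >= players_per_match:
--                 matches.append(waiting)
--                 busy.update(waiting)
--                 waiting = []
--                 waiting_set = set()
--                 if max_matches is not None and len(matches) >= max_matches:
--                     return matches
--     return matches
-- ===== Notes on version B (the rewrite author's own statement) =====
-- stated objective: faster
-- what changed: A re-appends duplicate arrivals to a queue and, on every arrival, rescans the whole queue to count distinct non-busy players and rebuilds the queue when a match forms; B keeps a single list+set of distinct waiting players so each arrival is O(1) and a match is emitted the moment the list reaches the threshold.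
-- outside the precondition, e.g. on form_matches_fifo([0], 5, 0, 2): A returns [[], []], B returns [[0]]
import Mathlib
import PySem

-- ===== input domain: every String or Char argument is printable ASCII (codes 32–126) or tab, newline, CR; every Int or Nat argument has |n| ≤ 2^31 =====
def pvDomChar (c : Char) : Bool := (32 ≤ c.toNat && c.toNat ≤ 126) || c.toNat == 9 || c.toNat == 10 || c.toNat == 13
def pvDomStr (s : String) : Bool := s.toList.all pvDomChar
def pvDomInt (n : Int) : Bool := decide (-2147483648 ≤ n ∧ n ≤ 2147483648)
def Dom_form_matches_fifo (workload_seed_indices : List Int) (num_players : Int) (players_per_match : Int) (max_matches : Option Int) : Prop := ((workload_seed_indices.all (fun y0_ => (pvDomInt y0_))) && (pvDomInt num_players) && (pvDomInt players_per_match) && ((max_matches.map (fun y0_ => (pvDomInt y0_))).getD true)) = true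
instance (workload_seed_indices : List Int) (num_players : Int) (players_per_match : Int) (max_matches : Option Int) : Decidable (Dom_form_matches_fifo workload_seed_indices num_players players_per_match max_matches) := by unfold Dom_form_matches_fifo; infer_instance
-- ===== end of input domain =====

-- B replaces A's per-arrival rescan of a duplicate-carrying queue by one list+set of
-- distinct waiting players updated in O(1) per arrival (objective: faster, one pass).

-- ===== PORT A =====
-- inner for-loop of A: for idx in list(queue): if idx not in busy and idx not in seen:
--   distinct.append(idx); seen.add(idx);  if len(distinct) >= players_per_match: break
def fmScan (busy : PySem.Set Int) (ppm : Int) : List Int → List Int → PySem.Set Int → List Int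
  | [], distinct, _ => distinct
  | idx :: rest, distinct, seen =>
      let d2 := if ¬ busy.contains idx ∧ ¬ seen.contains idx then distinct ++ [idx] else distinct
      let s2 := if ¬ busy.contains idx ∧ ¬ seen.contains idx then seen.add idx else seen
      if ppm ≤ (d2.length : Int) then d2 else fmScan busy ppm rest d2 s2

-- A's 'while len(queue) > 0' loop; fuel bounds the iterations (on inputs with
-- players_per_match ≥ 1 — the Pre_ below — the Python loop runs at most twice per
-- arrival, so fuel = queue.length + 1 is never exhausted; Bool flag = 'return matches'.
-- The Python queue rebuild (popleft / append if not in chosen_set) keeps exactly the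
-- elements outside chosen_set in order = List.filter.
def fmInner (ppm : Int) (maxm : Option Int) : Nat → PySem.Set Int → List Int → List (List Int) → (PySem.Set Int × List Int × List (List Int) × Bool)
  | 0, busy, queue, ms => (busy, queue, ms, false)
  | fuel+1, busy, queue, ms =>
    if 0 < queue.length then
      let distinct := fmScan busy ppm queue [] PySem.Set.empty
      if (distinct.length : Int) < ppm then (busy, queue, ms, false)
      else
        let chosen := PySem.List.slice distinct none (some ppm)
        let ms2 := ms ++ [chosen]
        let chosenSet := PySem.Set.ofList chosen
        let queue2 := queue.filter (fun x => ¬ chosenSet.contains x)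
        let busy2 := chosen.foldl (fun b p => PySem.Set.add b p) busy
        match maxm with
        | some m => if m ≤ (ms2.length : Int) then (busy2, queue2, ms2, true)
                    else fmInner ppm maxm fuel busy2 queue2 ms2
        | none => fmInner ppm maxm fuel busy2 queue2 ms2
    else (busy, queue, ms, false)

-- A's outer 'for seed_idx in workload_seed_indices' loop
def fmOuter (num_players ppm : Int) (maxm : Option Int) : List Int → PySem.Set Int → List Int → List (List Int) → List (List Int)
  | [], _, _, ms => ms
  | s :: rest, busy, queue, ms =>
    if s < 0 ∨ num_players ≤ s then fmOuter num_players ppm maxm rest busy queue ms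
    else if busy.contains s then fmOuter num_players ppm maxm rest busy queue ms
    else
      match fmInner ppm maxm ((queue ++ [s]).length + 1) busy (queue ++ [s]) ms with
      | (busy3, queue3, ms3, ret) =>
        if ret then ms3 else fmOuter num_players ppm maxm rest busy3 queue3 ms3

def form_matches_fifo (workload_seed_indices : List Int) (num_players : Int) (players_per_match : Int) (max_matches : Option Int) : List (List Int) :=
  fmOuter num_players players_per_match max_matches workload_seed_indices PySem.Set.empty [] []

-- ===== PORT B =====
-- one pass; state = busy set, distinct waiting players (list, arrival order) + its set
def fmAltGo (num_players ppm : Int) (maxm : Option Int) : List Int → PySem.Set Int → List Int → PySem.Set Int → List (List Int) → List (List Int)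
  | [], _, _, _, ms => ms
  | s :: rest, busy, waiting, wset, ms =>
    if 0 ≤ s ∧ s < num_players ∧ ¬ busy.contains s ∧ ¬ wset.contains s then
      let waiting2 := waiting ++ [s]
      if ppm ≤ (waiting2.length : Int) then
        let ms2 := ms ++ [waiting2]
        let busy2 := waiting2.foldl (fun b p => PySem.Set.add b p) busy
        match maxm with
        | some m => if m ≤ (ms2.length : Int) then ms2
                    else fmAltGo num_players ppm maxm rest busy2 [] PySem.Set.empty ms2
        | none => fmAltGo num_players ppm maxm rest busy2 [] PySem.Set.empty ms2
      else fmAltGo num_players ppm maxm rest busy waiting2 (PySem.Set.add wset s) ms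
    else fmAltGo num_players ppm maxm rest busy waiting wset ms

def form_matches_fifo_alt (workload_seed_indices : List Int) (num_players : Int) (players_per_match : Int) (max_matches : Option Int) : List (List Int) :=
  fmAltGo num_players players_per_match max_matches workload_seed_indices PySem.Set.empty [] PySem.Set.empty []

-- ===== PRECONDITION & SPEC =====
-- Pre_ excludes inputs with players_per_match ≤ 0 AND at least one arrival in range
-- [0, num_players): there the Python A either loops forever (max_matches None) or emits
-- repeated empty matches, an artefact of 'len(distinct) >= players_per_match' holding vacuously.
def Pre_form_matches_fifo (workload_seed_indices : List Int) (num_players : Int) (players_per_match : Int) (max_matches : Option Int) : Prop :=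
  1 ≤ players_per_match ∨ ∀ x ∈ workload_seed_indices, x < 0 ∨ num_players ≤ x
instance (workload_seed_indices : List Int) (num_players : Int) (players_per_match : Int) (max_matches : Option Int) : Decidable (Pre_form_matches_fifo workload_seed_indices num_players players_per_match max_matches) := by unfold Pre_form_matches_fifo; infer_instance

def pvWitness_form_matches_fifo : List Int × Int × Int × Option Int := ([0, 1, 2, 0, 3], 4, 2, none)

def Spec_form_matches_fifo (workload_seed_indices : List Int) (num_players : Int) (players_per_match : Int) (max_matches : Option Int) (out : List (List Int)) : Prop := out = form_matches_fifo_alt workload_seed_indices num_players players_per_match max_matches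
instance (workload_seed_indices : List Int) (num_players : Int) (players_per_match : Int) (max_matches : Option Int) (out : List (List Int)) : Decidable (Spec_form_matches_fifo workload_seed_indices num_players players_per_match max_matches out) := by unfold Spec_form_matches_fifo; infer_instance

-- ===== CLAIM (what is proved, stated in full; the proofs are below) =====
def Claim_equal_form_matches_fifo : Prop := ∀ (workload_seed_indices : List Int) (num_players : Int) (players_per_match : Int) (max_matches : Option Int), Dom_form_matches_fifo workload_seed_indices num_players players_per_match max_matches → Pre_form_matches_fifo workload_seed_indices num_players players_per_match max_matches → Spec_form_matches_fifo workload_seed_indices num_players players_per_match max_matches (form_matches_fifo workload_seed_indices num_players players_per_match max_matches)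

-- ===== LEMMAS AND PROOFS =====

-- keep-first dedup of a list relative to an already-seen set (proof-only helper)
def dkf : List Int → PySem.Set Int → List Int
  | [], _ => []
  | x :: r, seen => if x ∈ seen then dkf r seen else x :: dkf r (PySem.Set.add seen x)

lemma dkf_subset {qs : List Int} {seen : PySem.Set Int} {x : Int} (h : x ∈ dkf qs seen) : x ∈ qs := by
  induction qs generalizing seen with
  | nil => simp [dkf] at h
  | cons a r ih =>
    simp only [dkf] at h
    by_cases hc : a ∈ seen
    · rw [if_pos hc] at h
      exact List.mem_cons_of_mem _ (ih h)
    · rw [if_neg hc] at h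
      rcases List.mem_cons.1 h with rfl | h
      · exact List.mem_cons_self
      · exact List.mem_cons_of_mem _ (ih h)

lemma mem_dkf_or_seen {qs : List Int} {seen : PySem.Set Int} {x : Int} (h : x ∈ qs) :
    x ∈ dkf qs seen ∨ x ∈ seen := by
  induction qs generalizing seen with
  | nil => simp at h
  | cons a r ih =>
    simp only [dkf]
    by_cases hc : a ∈ seen
    · rw [if_pos hc]
      rcases List.mem_cons.1 h with rfl | h
      · exact Or.inr hc
      · exact ih h
    · rw [if_neg hc]
      rcases List.mem_cons.1 h with rfl | h
      · exact Or.inl List.mem_cons_self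
      · rcases ih (seen := PySem.Set.add seen a) h with h2 | h2
        · exact Or.inl (List.mem_cons_of_mem _ h2)
        · rcases (PySem.Set.mem_add _ _ _).1 h2 with h3 | h3
          · exact Or.inr h3
          · exact Or.inl (h3 ▸ List.mem_cons_self)

lemma dkf_append_mem {qs : List Int} {seen : PySem.Set Int} {s : Int}
    (h : s ∈ qs ∨ s ∈ seen) : dkf (qs ++ [s]) seen = dkf qs seen := by
  induction qs generalizing seen with
  | nil =>
    have hs : s ∈ seen := by simpa using h
    simp [dkf, hs]
  | cons a r ih =>
    simp only [List.cons_append, dkf]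
    by_cases hc : a ∈ seen
    · rw [if_pos hc, if_pos hc]
      apply ih
      rcases h with h | h
      · rcases List.mem_cons.1 h with rfl | h
        · exact Or.inr hc
        · exact Or.inl h
      · exact Or.inr h
    · rw [if_neg hc, if_neg hc]
      congr 1
      apply ih
      rcases h with h | h
      · rcases List.mem_cons.1 h with rfl | h
        · exact Or.inr ((PySem.Set.mem_add _ _ _).2 (Or.inr rfl))
        · exact Or.inl h
      · exact Or.inr ((PySem.Set.mem_add _ _ _).2 (Or.inl h))

lemma dkf_append_not_mem {qs : List Int} {seen : PySem.Set Int} {s : Int}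
    (h1 : s ∉ qs) (h2 : s ∉ seen) :
    dkf (qs ++ [s]) seen = dkf qs seen ++ [s] := by
  induction qs generalizing seen with
  | nil => simp [dkf, h2]
  | cons a r ih =>
    simp only [List.cons_append, dkf]
    have ha : s ≠ a := fun h => h1 (h ▸ List.mem_cons_self)
    have hr : s ∉ r := fun h => h1 (List.mem_cons_of_mem _ h)
    by_cases hc : a ∈ seen
    · rw [if_pos hc, if_pos hc]
      exact ih hr h2
    · rw [if_neg hc, if_neg hc]
      rw [List.cons_append]
      congr 1
      apply ih hr
      intro hmem
      rcases (PySem.Set.mem_add _ _ _).1 hmem with h3 | h3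
      · exact h2 h3
      · exact ha h3

lemma fmScan_eq (busy : PySem.Set Int) (ppm : Int) :
    ∀ (qs distinct : List Int) (seen : PySem.Set Int),
    (∀ x ∈ qs, x ∉ busy) →
    ((distinct.length : Int) + ((dkf qs seen).length : Int) ≤ ppm) →
    fmScan busy ppm qs distinct seen = distinct ++ dkf qs seen := by
  intro qs
  induction qs with
  | nil => intro distinct seen _ _; simp [fmScan, dkf]
  | cons idx r ih =>
    intro distinct seen hb hlen
    have hbi : idx ∉ busy := hb idx List.mem_cons_self
    have hbr : ∀ x ∈ r, x ∉ busy := fun x hx => hb x (List.mem_cons_of_mem _ hx)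
    simp only [fmScan]
    by_cases hc : idx ∈ seen
    · simp only [dkf, if_pos hc] at hlen ⊢
      have hcond : ¬ (¬ busy.contains idx ∧ ¬ seen.contains idx) := by
        simp [hc]
      rw [if_neg hcond, if_neg hcond]
      by_cases hle : ppm ≤ (distinct.length : Int)
      · rw [if_pos hle]
        have : (dkf r seen).length = 0 := by omega
        simp [List.length_eq_zero_iff.1 this]
      · rw [if_neg hle]
        exact ih distinct seen hbr hlen
    · simp only [dkf, if_neg hc] at hlen ⊢
      have hcond : (¬ busy.contains idx ∧ ¬ seen.contains idx) := by
        simp [hc, hbi]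
      rw [if_pos hcond, if_pos hcond]
      split_ifs with hle
      · have h0 : (dkf r (PySem.Set.add seen idx)).length = 0 := by
          simp at hlen hle; omega
        simp [List.length_eq_zero_iff.1 h0]
      · rw [ih (distinct ++ [idx]) (PySem.Set.add seen idx) hbr (by simp at hlen ⊢; omega)]
        simp

-- when every arrival is out of range both programs just fall through
lemma fm_skipA (n ppm : Int) (maxm : Option Int) :
    ∀ (ws : List Int) (busy : PySem.Set Int) (queue : List Int) (ms : List (List Int)),
    (∀ x ∈ ws, x < 0 ∨ n ≤ x) →
    fmOuter n ppm maxm ws busy queue ms = ms := by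
  intro ws
  induction ws with
  | nil => intro busy queue ms _; simp [fmOuter]
  | cons s rest ih =>
    intro busy queue ms h
    simp only [fmOuter]
    rw [if_pos (h s List.mem_cons_self)]
    exact ih busy queue ms (fun x hx => h x (List.mem_cons_of_mem _ hx))

lemma fm_skipB (n ppm : Int) (maxm : Option Int) :
    ∀ (ws : List Int) (busy : PySem.Set Int) (waiting : List Int) (wset : PySem.Set Int) (ms : List (List Int)),
    (∀ x ∈ ws, x < 0 ∨ n ≤ x) →
    fmAltGo n ppm maxm ws busy waiting wset ms = ms := by
  intro ws
  induction ws with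
  | nil => intro busy waiting wset ms _; simp [fmAltGo]
  | cons s rest ih =>
    intro busy waiting wset ms h
    simp only [fmAltGo]
    rw [if_neg (by rintro ⟨ha, hb, -⟩; rcases h s List.mem_cons_self with h | h <;> omega)]
    exact ih busy waiting wset ms (fun x hx => h x (List.mem_cons_of_mem _ hx))

-- main simulation invariant: A's (busy, queue) is represented by B's (busy, waiting, wset)
-- where waiting = keep-first dedup of queue, wset = its set, and |waiting| < ppm
lemma fm_sim (n ppm : Int) (hp : 1 ≤ ppm) (maxm : Option Int) :
    ∀ (ws : List Int) (busy : PySem.Set Int) (queue waiting : List Int) (wset : PySem.Set Int)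
      (ms : List (List Int)),
    (∀ x ∈ queue, x ∉ busy) →
    dkf queue PySem.Set.empty = waiting →
    (∀ x : Int, x ∈ wset ↔ x ∈ waiting) →
    ((waiting.length : Int) < ppm) →
    fmOuter n ppm maxm ws busy queue ms = fmAltGo n ppm maxm ws busy waiting wset ms := by
  intro ws
  induction ws with
  | nil => intro busy queue waiting wset ms _ _ _ _; simp [fmOuter, fmAltGo]
  | cons s rest ih =>
    intro busy queue waiting wset ms hqb hdkf hwset hlen
    simp only [fmOuter, fmAltGo]
    by_cases h1 : s < 0 ∨ n ≤ s
    · have hbg : ¬ (0 ≤ s ∧ s < n ∧ ¬ busy.contains s = true ∧ ¬ wset.contains s = true) := by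
        rintro ⟨ha, hb, -⟩; rcases h1 with h | h <;> omega
      rw [if_pos h1, if_neg hbg]
      exact ih busy queue waiting wset ms hqb hdkf hwset hlen
    rw [not_or, not_lt, not_le] at h1
    have hA1 : ¬ (s < 0 ∨ n ≤ s) := by omega
    rw [if_neg hA1]
    by_cases h2 : s ∈ busy
    · have hb2 : busy.contains s = true := (PySem.Set.contains_iff _ _).2 h2
      have hbg : ¬ (0 ≤ s ∧ s < n ∧ ¬ busy.contains s = true ∧ ¬ wset.contains s = true) := by
        rintro ⟨-, -, hc, -⟩; exact hc hb2
      rw [if_pos hb2, if_neg hbg]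
      exact ih busy queue waiting wset ms hqb hdkf hwset hlen
    have hb2 : ¬ busy.contains s = true := fun h => h2 ((PySem.Set.contains_iff _ _).1 h)
    rw [if_neg hb2]
    have hq2b : ∀ x ∈ queue ++ [s], x ∉ busy := by
      intro x hx
      rcases List.mem_append.1 hx with hx | hx
      · exact hqb x hx
      · simp at hx; exact hx ▸ h2
    have hfuel : (queue ++ [s]).length + 1 = (queue.length + 1) + 1 := by simp
    have hq2pos : 0 < (queue ++ [s]).length := by simp
    by_cases h3 : s ∈ wset
    · -- duplicate arrival of a waiting player: A appends it to the queue, no new match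
      have hsw : s ∈ waiting := (hwset s).1 h3
      have hsq : s ∈ queue := dkf_subset (hdkf ▸ hsw)
      have hd2 : dkf (queue ++ [s]) PySem.Set.empty = waiting := by
        rw [dkf_append_mem (Or.inl hsq)]; exact hdkf
      have hscan : fmScan busy ppm (queue ++ [s]) [] PySem.Set.empty = waiting := by
        rw [fmScan_eq busy ppm (queue ++ [s]) [] PySem.Set.empty hq2b (by rw [hd2]; simpa using le_of_lt hlen)]
        simpa using hd2
      have hbg : ¬ (0 ≤ s ∧ s < n ∧ ¬ busy.contains s = true ∧ ¬ wset.contains s = true) := by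
        rintro ⟨-, -, -, hc⟩; exact hc ((PySem.Set.contains_iff _ _).2 h3)
      rw [if_neg hbg, hfuel, fmInner]
      simp only [hscan]
      rw [if_pos hq2pos, if_pos hlen]
      exact ih busy (queue ++ [s]) waiting wset ms hq2b hd2 hwset hlen
    · -- genuinely new waiting player
      have hsw : s ∉ waiting := fun h => h3 ((hwset s).2 h)
      have hsq : s ∉ queue := by
        intro h
        rcases mem_dkf_or_seen (seen := PySem.Set.empty) h with h | h
        · exact hsw (hdkf ▸ h)
        · simp [PySem.Set.empty] at h
      have hd2 : dkf (queue ++ [s]) PySem.Set.empty = waiting ++ [s] := by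
        rw [dkf_append_not_mem hsq (by simp [PySem.Set.empty])]; rw [hdkf]
      have hscan : fmScan busy ppm (queue ++ [s]) [] PySem.Set.empty = waiting ++ [s] := by
        rw [fmScan_eq busy ppm (queue ++ [s]) [] PySem.Set.empty hq2b (by rw [hd2]; simp; omega)]
        simpa using hd2
      have hw3 : ¬ wset.contains s = true := fun h => h3 ((PySem.Set.contains_iff _ _).1 h)
      have hbg : (0 ≤ s ∧ s < n ∧ ¬ busy.contains s = true ∧ ¬ wset.contains s = true) :=
        ⟨h1.1, h1.2, hb2, hw3⟩
      rw [if_pos hbg, hfuel, fmInner]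
      simp only [hscan]
      rw [if_pos hq2pos]
      by_cases h4 : (((waiting ++ [s]).length : Nat) : Int) < ppm
      · -- not enough players yet: A breaks, B keeps accumulating
        have hble : ¬ ppm ≤ (((waiting ++ [s]).length : Nat) : Int) := not_le.mpr h4
        rw [if_pos h4, if_neg hble]
        refine ih busy (queue ++ [s]) (waiting ++ [s]) (PySem.Set.add wset s) ms hq2b hd2 ?_ h4
        intro x
        rw [PySem.Set.mem_add _ _ x, hwset x]
        simp [List.mem_append, or_comm]
      · -- threshold reached: |waiting ++ [s]| = ppm, a match is formed, the queue empties
        have hthr : ppm ≤ (((waiting ++ [s]).length : Nat) : Int) := not_lt.1 h4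
        rw [if_neg h4, if_pos hthr]
        have hppm : ppm = (((waiting ++ [s]).length : Nat) : Int) := by
          have hlen1 : ((waiting ++ [s]).length : Int) = (waiting.length : Int) + 1 := by simp
          omega
        have hchosen : PySem.List.slice (waiting ++ [s]) none (some ppm) = waiting ++ [s] := by
          rw [hppm, PySem.List.slice_to_natCast, List.take_length]
        have hfilter : List.filter (fun x => ¬ (PySem.Set.ofList (waiting ++ [s])).contains x) (queue ++ [s]) = [] := by
          rw [List.filter_eq_nil_iff]
          intro x hx
          have hxw : x ∈ waiting ++ [s] := by
            rcases mem_dkf_or_seen (seen := PySem.Set.empty) hx with h | h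
            · exact hd2 ▸ h
            · simp [PySem.Set.empty] at h
          simp [PySem.Set.mem_ofList, hxw]
        have hempty : ∀ (b : PySem.Set Int) (m : List (List Int)),
            fmInner ppm maxm (queue.length + 1) b [] m = (b, [], m, false) := by
          intro b m; simp [fmInner]
        have hinv0 : ∀ (b2 : PySem.Set Int) (m2 : List (List Int)),
            fmOuter n ppm maxm rest b2 [] m2 = fmAltGo n ppm maxm rest b2 [] PySem.Set.empty m2 := by
          intro b2 m2
          exact ih b2 [] [] PySem.Set.empty m2 (by simp) rfl (by simp [PySem.Set.empty]) (by simpa using hp)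
        rw [hchosen, hfilter]
        rcases maxm with _ | m
        · simp only [hempty]
          exact hinv0 _ _
        · by_cases h5 : m ≤ ((ms ++ [waiting ++ [s]]).length : Int)
          · have h5' : m ≤ (ms.length : Int) + 1 := by simpa using h5
            simp [h5']
          · simp only [if_neg h5, hempty]
            exact hinv0 _ _

-- ===== VERDICT (by name: the statement is the Claim_ definition above) =====
theorem form_matches_fifo_spec : Claim_equal_form_matches_fifo := by
  intro ws n ppm maxm _ hpre
  unfold Spec_form_matches_fifo form_matches_fifo form_matches_fifo_alt
  rcases hpre with hp | hall
  · exact fm_sim n ppm hp maxm ws _ [] [] _ [] (by simp) rfl (by simp [PySem.Set.empty]) (by exact_mod_cast hp)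
  · rw [fm_skipA n ppm maxm ws _ [] [] hall, fm_skipB n ppm maxm ws _ [] _ [] hall]
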